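-- pv_equiv track=rewrite | github.com/shkim5164/algorithm2021 | programmers/주식가격.py | solution
-- ===== SOURCE A (Python) =====
-- def solution(prices):
--     time_check = [0 for _ in range(len(prices))]
--     stack_price = []
--     stack_index = []
--
--     for index in range(len(prices)-1):
--         now_price = prices[index]
--         if stack_price:
--
--             while stack_price and now_price < stack_price[-1]:
--                 stack_price.pop()
--                 stack_index.pop()
--
--             stack_price.append(now_price)
--             stack_index.append(index)
--         else:
--             stack_price.append(now_price)
--             stack_index.append(index)
--
--         for i in stack_index:
--             time_check[i] += 1
--
--
--     return time_check
-- ===== SOURCE B (Python) =====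
-- def solution(prices):
--     # Monotonic stack: answer[i] is set to j-i when a strictly smaller price at j
--     # pops i; indices still stacked at the end get n-1-i.
--     n = len(prices)
--     answer = [0] * n
--     stack = []
--     for j, p in enumerate(prices):
--         while stack and prices[stack[-1]] > p:
--             i = stack.pop()
--             answer[i] = j - i
--         stack.append(j)
--     for i in stack:
--         answer[i] = n - 1 - i
--     return answer
-- ===== Notes on version B (the rewrite author's own statement) =====
-- stated objective: faster
-- what changed: Replaced A's per-iteration sweep that increments a counter for every index currently on the stack (O(n^2)) by the standard monotonic stack that writes each answer exactly once: j-i when index i is popped by a strictly smaller price at j, n-1-i for indices left on the stack.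
import Mathlib
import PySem

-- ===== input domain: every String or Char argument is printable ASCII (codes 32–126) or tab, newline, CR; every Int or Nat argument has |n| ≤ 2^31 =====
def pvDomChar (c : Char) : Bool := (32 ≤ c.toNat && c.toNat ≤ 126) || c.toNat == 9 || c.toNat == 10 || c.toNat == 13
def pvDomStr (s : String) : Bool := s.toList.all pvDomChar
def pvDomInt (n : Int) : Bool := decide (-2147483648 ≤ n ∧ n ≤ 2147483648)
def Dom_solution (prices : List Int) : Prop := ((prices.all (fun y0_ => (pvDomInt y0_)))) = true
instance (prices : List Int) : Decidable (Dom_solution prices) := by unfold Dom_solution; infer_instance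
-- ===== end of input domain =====

-- B replaces A's O(n^2) per-iteration stack sweep by a one-pass monotonic stack (objective: faster).

-- ===== PORT A =====
-- Python stacks append/pop at the END; both ports keep the stack top at the HEAD of the Lean list.
-- 'while stack_price and now_price < stack_price[-1]: pop both stacks' (top = head here)
def popA (now : Int) : List Int → List Int → List Int × List Int
  | p :: ps, j :: js => if now < p then popA now ps js else (p :: ps, j :: js)
  | ps, js => (ps, js)

-- 'for i in stack_index: time_check[i] += 1' over one Python-order (bottom-to-top) stack;
-- i is always a valid index of time_check, so pyGetD/pySetD are exact here.
def incAll (si : List Int) (tc : List Int) : List Int :=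
  si.foldl (fun tc i => PySem.List.pySetD tc i (PySem.List.pyGetD tc i 0 + 1)) tc

-- one iteration of A's main loop; index is always a valid index of prices, so pyGetD is exact
def stepA (prices : List Int) (st : List Int × List Int × List Int) (index : Int) :
    List Int × List Int × List Int :=
  let now := PySem.List.pyGetD prices index 0
  let s2 :=
    if st.2.1 ≠ [] then
      let pr := popA now st.2.1 st.2.2
      (now :: pr.1, index :: pr.2)
    else
      (now :: st.2.1, index :: st.2.2)
  (incAll s2.2.reverse st.1, s2.1, s2.2)

def solution (prices : List Int) : List Int :=
  let tc0 := (PySem.List.pyRange 0 (PySem.List.len prices) 1).map (fun _ => (0 : Int))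
  ((PySem.List.pyRange 0 (PySem.List.len prices - 1) 1).foldl (stepA prices)
      (tc0, ([] : List Int), ([] : List Int))).1

-- ===== PORT B =====
-- 'while stack and prices[stack[-1]] > p: i = stack.pop(); answer[i] = j - i'  (top = head here;
-- stacked i is always a valid index of prices/answer, so pyGetD/pySetD are exact)
def popB (p j : Int) (prices : List Int) : List Int → List Int → List Int × List Int
  | i :: is, ans =>
      if PySem.List.pyGetD prices i 0 > p then
        popB p j prices is (PySem.List.pySetD ans i (j - i))
      else (i :: is, ans)
  | [], ans => ([], ans)

def stepB (prices : List Int) (st : List Int × List Int) (jp : Int × Int) : List Int × List Int :=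
  let r := popB jp.2 jp.1 prices st.2 st.1
  (r.2, jp.1 :: r.1)

def solution_alt (prices : List Int) : List Int :=
  let n := PySem.List.len prices
  let st := (PySem.List.enumerate prices).foldl (stepB prices) (List.replicate prices.length 0, ([] : List Int))
  -- 'for i in stack: answer[i] = n - 1 - i' in Python (bottom-to-top) order
  st.2.reverse.foldl (fun ans i => PySem.List.pySetD ans i (n - 1 - i)) st.1

-- ===== PRECONDITION & SPEC =====
def Spec_solution (prices : List Int) (out : List Int) : Prop := out = solution_alt prices
instance (prices : List Int) (out : List Int) : Decidable (Spec_solution prices out) := by unfold Spec_solution; infer_instance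

-- ===== CLAIM (what is proved, stated in full; the proofs are below) =====
def Claim_equal_solution : Prop := ∀ (prices : List Int), Dom_solution prices → Spec_solution prices (solution prices)

-- ===== LEMMAS AND PROOFS =====

-- the coupling invariant (StInv) after both programs have processed indices 0..t-1
def StInv (prices : List Int) (t : Nat) (tc sp si ans st2 : List Int) : Prop :=
  tc.length = prices.length ∧ ans.length = prices.length ∧
  st2 = si ∧ sp = si.map (fun i => PySem.List.pyGetD prices i 0) ∧
  si.Nodup ∧ (∀ i ∈ si, 0 ≤ i ∧ i < (t : Int)) ∧
  (∀ k : Nat, k < prices.length →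
    if (k : Int) ∈ si then tc.getD k 0 = (t : Int) - k ∧ ans.getD k 0 = 0
    else if k < t then tc.getD k 0 = ans.getD k 0
    else tc.getD k 0 = 0 ∧ ans.getD k 0 = 0)

theorem getD_set_eq (ans : List Int) (i : Int) (w : Int) (k : Nat) (h0 : 0 ≤ i) (hl : i < (ans.length : Int)) :
    (ans.set i.toNat w).getD k 0 = if (k : Int) = i then w else ans.getD k 0 := by
  rw [List.getD_eq_getElem?_getD, List.getElem?_set]
  by_cases hki : (k : Int) = i
  · have h1 : i.toNat = k := by omega
    have h2 : i.toNat < ans.length := by omega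
    have h3 : k < ans.length := by omega
    simp [h1, h3, hki]
  · have h1 : i.toNat ≠ k := by omega
    simp [h1, hki, List.getD_eq_getElem?_getD]

theorem pop_ab (prices : List Int) (now t : Int) :
    ∀ (si ans : List Int), si.Nodup → (∀ i ∈ si, 0 ≤ i ∧ i < (ans.length : Int)) →
    popA now (si.map (fun i => PySem.List.pyGetD prices i 0)) si
        = ((popB now t prices si ans).1.map (fun i => PySem.List.pyGetD prices i 0),
           (popB now t prices si ans).1) ∧
    (popB now t prices si ans).1.Sublist si ∧
    (popB now t prices si ans).2.length = ans.length ∧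
    (∀ k : Nat, (popB now t prices si ans).2.getD k 0 =
      if (k : Int) ∈ si ∧ (k : Int) ∉ (popB now t prices si ans).1 then t - k else ans.getD k 0) := by
  intro si
  induction si with
  | nil =>
    intro ans _ _
    refine ⟨by simp [popA, popB], by simp [popB], by simp [popB], ?_⟩
    intro k; simp [popB]
  | cons i is ih =>
    intro ans hnd hb
    obtain ⟨hi0, hilt⟩ := hb i (List.mem_cons_self)
    have hnotin : i ∉ is := (List.nodup_cons.mp hnd).1
    by_cases h : now < PySem.List.pyGetD prices i 0
    · have hset : PySem.List.pySetD ans i (t - i) = ans.set i.toNat (t - i) := by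
        rw [PySem.List.pySetD_of_nonneg]; exact hi0
      have hlen : (ans.set i.toNat (t - i)).length = ans.length := by simp
      have hBstep : popB now t prices (i :: is) ans
          = popB now t prices is (ans.set i.toNat (t - i)) := by
        simp only [popB]; rw [if_pos h, hset]
      have hAstep : popA now ((i :: is).map (fun i => PySem.List.pyGetD prices i 0)) (i :: is)
          = popA now (is.map (fun i => PySem.List.pyGetD prices i 0)) is := by
        simp only [List.map_cons, popA]; rw [if_pos h]
      obtain ⟨h1, h2, h3, h4⟩ := ih (ans.set i.toNat (t - i)) hnd.of_cons (by
        intro j hj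
        rcases hb j (List.mem_cons_of_mem _ hj) with ⟨hj1, hj2⟩
        exact ⟨hj1, by rw [hlen]; exact hj2⟩)
      rw [hBstep, hAstep]
      refine ⟨h1, h2.trans (List.sublist_cons_self i is), h3.trans hlen, ?_⟩
      intro k
      rw [h4 k, getD_set_eq ans i (t - i) k hi0 hilt]
      by_cases hk1 : (k : Int) ∈ is ∧ (k : Int) ∉ (popB now t prices is (ans.set i.toNat (t - i))).1
      · rw [if_pos hk1, if_pos ⟨List.mem_cons_of_mem i hk1.1, hk1.2⟩]
      · rw [if_neg hk1]
        by_cases hki : (k : Int) = i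
        · have hni : (k : Int) ∉ (popB now t prices is (ans.set i.toNat (t - i))).1 := by
            intro hmem
            exact hnotin (by rw [← hki]; exact h2.mem hmem)
          rw [if_pos hki, if_pos ⟨by simp [hki], hni⟩, hki]
        · rw [if_neg hki, if_neg (by
            rintro ⟨hm, hn⟩
            rcases List.mem_cons.mp hm with hc | hc
            · exact hki hc
            · exact hk1 ⟨hc, hn⟩)]
    · have hBstep : popB now t prices (i :: is) ans = (i :: is, ans) := by
        simp only [popB]; rw [if_neg h]
      have hAstep : popA now ((i :: is).map (fun i => PySem.List.pyGetD prices i 0)) (i :: is)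
          = ((i :: is).map (fun i => PySem.List.pyGetD prices i 0), i :: is) := by
        simp only [List.map_cons, popA]; rw [if_neg h]
      rw [hBstep, hAstep]
      refine ⟨rfl, List.Sublist.refl _, rfl, ?_⟩
      intro k
      rw [if_neg (by rintro ⟨hm, hn⟩; exact hn hm)]

theorem setAll_spec (v : Int → Int) (si : List Int) : ∀ (ans : List Int), si.Nodup →
    (∀ i ∈ si, 0 ≤ i ∧ i < (ans.length : Int)) →
    (si.foldl (fun a i => PySem.List.pySetD a i (v i)) ans).length = ans.length ∧
    (∀ k : Nat, (si.foldl (fun a i => PySem.List.pySetD a i (v i)) ans).getD k 0 =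
      if (k : Int) ∈ si then v k else ans.getD k 0) := by
  induction si with
  | nil => intro ans _ _; simp
  | cons i is ih =>
    intro ans hnd hb
    obtain ⟨hi0, hilt⟩ := hb i (List.mem_cons_self)
    have hset : PySem.List.pySetD ans i (v i) = ans.set i.toNat (v i) := by
      rw [PySem.List.pySetD_of_nonneg]; exact hi0
    have hlen : (ans.set i.toNat (v i)).length = ans.length := by simp
    have ih' := ih (ans.set i.toNat (v i)) hnd.of_cons (by
      intro j hj
      rcases hb j (List.mem_cons_of_mem _ hj) with ⟨h1, h2⟩
      exact ⟨h1, by rw [hlen]; exact h2⟩)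
    simp only [List.foldl_cons, hset]
    refine ⟨by rw [ih'.1, hlen], ?_⟩
    intro k
    rw [ih'.2 k, getD_set_eq ans i (v i) k hi0 hilt]
    by_cases hk : (k : Int) ∈ is
    · simp [hk]
    · by_cases hki : (k : Int) = i
      · simp [hki]
      · simp [hk, hki]

theorem incAll_spec (si : List Int) : ∀ (tc : List Int), si.Nodup →
    (∀ i ∈ si, 0 ≤ i ∧ i < (tc.length : Int)) →
    (incAll si tc).length = tc.length ∧
    (∀ k : Nat, (incAll si tc).getD k 0 = tc.getD k 0 + (if (k : Int) ∈ si then 1 else 0)) := by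
  induction si with
  | nil => intro tc _ _; simp [incAll]
  | cons i is ih =>
    intro tc hnd hb
    obtain ⟨hi0, hilt⟩ := hb i (List.mem_cons_self)
    have hget : PySem.List.pyGetD tc i 0 = tc.getD i.toNat 0 := by
      rw [List.getD_eq_getElem tc 0 (by omega : i.toNat < tc.length)]
      rw [PySem.List.pyGetD_eq_getElem] <;> assumption
    have hset : PySem.List.pySetD tc i (PySem.List.pyGetD tc i 0 + 1)
        = tc.set i.toNat (tc.getD i.toNat 0 + 1) := by
      rw [PySem.List.pySetD_of_nonneg, hget]; exact hi0
    have hlen : (tc.set i.toNat (tc.getD i.toNat 0 + 1)).length = tc.length := by simp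
    have ih' := ih (tc.set i.toNat (tc.getD i.toNat 0 + 1)) hnd.of_cons (by
      intro j hj
      rcases hb j (List.mem_cons_of_mem _ hj) with ⟨h1, h2⟩
      exact ⟨h1, by rw [hlen]; exact h2⟩)
    have hstep : incAll (i :: is) tc = incAll is (tc.set i.toNat (tc.getD i.toNat 0 + 1)) := by
      simp only [incAll, List.foldl_cons, hset]
    rw [hstep]
    refine ⟨by rw [ih'.1, hlen], ?_⟩
    intro k
    rw [ih'.2 k, getD_set_eq tc i (tc.getD i.toNat 0 + 1) k hi0 hilt]
    have hnotin : i ∉ is := (List.nodup_cons.mp hnd).1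
    by_cases hki : (k : Int) = i
    · have hkn : (k : Int) ∉ is := by rw [hki]; simpa using hnotin
      have heq : tc.getD i.toNat 0 = tc.getD k 0 := by congr 1; omega
      rw [if_pos hki, if_neg hkn, if_pos (by simp [hki] : (k : Int) ∈ i :: is), heq]
      omega
    · by_cases hk : (k : Int) ∈ is <;> simp [hki, hk]

theorem step_inv (prices : List Int) (t : Nat) (tc sp si ans st2 : List Int)
    (h : StInv prices t tc sp si ans st2) (ht : t < prices.length) :
    StInv prices (t + 1)
      (stepA prices (tc, sp, si) (t : Int)).1
      (stepA prices (tc, sp, si) (t : Int)).2.1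
      (stepA prices (tc, sp, si) (t : Int)).2.2
      (stepB prices (ans, st2) ((t : Int), PySem.List.pyGetD prices (t : Int) 0)).1
      (stepB prices (ans, st2) ((t : Int), PySem.List.pyGetD prices (t : Int) 0)).2 := by
  obtain ⟨hlen_tc, hlen_ans, hst2, hsp, hnd, hbnd, hpt⟩ := h
  have hbnd' : ∀ i ∈ si, 0 ≤ i ∧ i < (ans.length : Int) := by
    intro i hi; rcases hbnd i hi with ⟨h1, h2⟩
    exact ⟨h1, by rw [hlen_ans]; exact_mod_cast lt_of_lt_of_le h2 (by exact_mod_cast ht.le)⟩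
  obtain ⟨h1, h2, h3, h4⟩ :=
    pop_ab prices (PySem.List.pyGetD prices (t : Int) 0) (t : Int) si ans hnd hbnd'
  set now := PySem.List.pyGetD prices (t : Int) 0 with hnow
  set rB := popB now (t : Int) prices si ans with hrB
  have hA : stepA prices (tc, sp, si) (t : Int)
      = (incAll ((t : Int) :: rB.1).reverse tc,
         now :: rB.1.map (fun i => PySem.List.pyGetD prices i 0), (t : Int) :: rB.1) := by
    cases si with
    | nil =>
      have : rB = ([], ans) := by rw [hrB]; rfl
      simp [stepA, hsp, this, hnow]
    | cons i is =>
      simp only [stepA, hsp]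
      rw [h1]
      simp [hnow]
  have hB : stepB prices (ans, st2) ((t : Int), now) = (rB.2, (t : Int) :: rB.1) := by
    simp only [stepB, hst2, hrB]
  rw [hA, hB]
  -- facts about the new stack
  have hsubmem : ∀ x, x ∈ rB.1 → x ∈ si := fun x hx => h2.mem hx
  have htnot : (t : Int) ∉ rB.1 := by
    intro hmem
    rcases hbnd _ (hsubmem _ hmem) with ⟨_, hlt⟩; omega
  have hndL : ((t : Int) :: rB.1).Nodup := List.nodup_cons.mpr ⟨htnot, h2.nodup hnd⟩
  have hbndL : ∀ i ∈ ((t : Int) :: rB.1), 0 ≤ i ∧ i < ((t + 1 : Nat) : Int) := by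
    intro i hi
    rcases List.mem_cons.mp hi with hc | hc
    · subst hc; exact ⟨by positivity, by push_cast; omega⟩
    · rcases hbnd _ (hsubmem _ hc) with ⟨h5, h6⟩; exact ⟨h5, by push_cast; omega⟩
  obtain ⟨hIlen, hIpt⟩ := incAll_spec ((t : Int) :: rB.1).reverse tc
    (by rw [List.nodup_reverse]; exact hndL)
    (by
      intro i hi
      rw [List.mem_reverse] at hi
      rcases hbndL i hi with ⟨h5, h6⟩
      refine ⟨h5, ?_⟩
      rw [hlen_tc]; push_cast at h6 ⊢; omega)
  refine ⟨by rw [hIlen, hlen_tc], by rw [h3, hlen_ans], rfl, by simp [hnow], hndL, hbndL, ?_⟩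
  intro k hk
  dsimp only
  have hIpt' := hIpt k
  simp only [List.mem_reverse] at hIpt'
  have hpt' := hpt k hk
  have h4' := h4 k
  by_cases hkt : (k : Int) = (t : Int)
  · have hkst : k = t := by exact_mod_cast hkt
    have hksi : (k : Int) ∉ si := by
      intro hmem; rcases hbnd _ hmem with ⟨_, hlt⟩; omega
    rw [if_neg hksi, if_neg (by omega)] at hpt'
    have hkmem : (k : Int) ∈ ((t : Int) :: rB.1) := by simp [hkt]
    rw [if_pos hkmem, hIpt', if_pos hkmem, hpt'.1]
    rw [if_neg (by rintro ⟨hm, _⟩; exact hksi hm)] at h4'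
    rw [h4', hpt'.2]
    refine ⟨by push_cast; omega, rfl⟩
  · by_cases hks : (k : Int) ∈ si
    · rcases hbnd _ hks with ⟨hk0, hklt⟩
      rw [if_pos hks] at hpt'
      by_cases hkr : (k : Int) ∈ rB.1
      · rw [if_pos (List.mem_cons_of_mem _ hkr), hIpt', if_pos (List.mem_cons_of_mem _ hkr),
          hpt'.1]
        rw [if_neg (by rintro ⟨_, hn⟩; exact hn hkr)] at h4'
        rw [h4', hpt'.2]
        refine ⟨by push_cast; omega, rfl⟩
      · have hkL : (k : Int) ∉ ((t : Int) :: rB.1) := by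
          intro hm; rcases List.mem_cons.mp hm with hc | hc; exacts [hkt hc, hkr hc]
        rw [if_neg hkL, if_pos (by omega : k < t + 1), hIpt', if_neg hkL, hpt'.1]
        rw [if_pos ⟨hks, hkr⟩] at h4'
        rw [h4']
        omega
    · have hkr : (k : Int) ∉ rB.1 := fun hm => hks (hsubmem _ hm)
      have hkL : (k : Int) ∉ ((t : Int) :: rB.1) := by
        intro hm; rcases List.mem_cons.mp hm with hc | hc; exacts [hkt hc, hkr hc]
      rw [if_neg hks] at hpt'
      rw [if_neg (by rintro ⟨hm, _⟩; exact hks hm)] at h4'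
      rw [if_neg hkL, hIpt', if_neg hkL, h4']
      by_cases hklt : k < t
      · rw [if_pos hklt] at hpt'
        rw [if_pos (by omega : k < t + 1)]
        omega
      · rw [if_neg hklt] at hpt'
        rw [if_neg (by omega : ¬ k < t + 1)]
        exact ⟨by omega, hpt'.2⟩

theorem fold_inv (prices : List Int) : ∀ (c t : Nat) (tc sp si ans st2 : List Int),
    StInv prices t tc sp si ans st2 → t + c ≤ prices.length →
    StInv prices (t + c)
      ((PySem.List.pyRange (t : Int) ((t : Int) + (c : Int)) 1).foldl (stepA prices) (tc, sp, si)).1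
      ((PySem.List.pyRange (t : Int) ((t : Int) + (c : Int)) 1).foldl (stepA prices) (tc, sp, si)).2.1
      ((PySem.List.pyRange (t : Int) ((t : Int) + (c : Int)) 1).foldl (stepA prices) (tc, sp, si)).2.2
      ((PySem.List.pyRange (t : Int) ((t : Int) + (c : Int)) 1).foldl
          (fun st j => stepB prices st (j, PySem.List.pyGetD prices j 0)) (ans, st2)).1
      ((PySem.List.pyRange (t : Int) ((t : Int) + (c : Int)) 1).foldl
          (fun st j => stepB prices st (j, PySem.List.pyGetD prices j 0)) (ans, st2)).2 := by
  intro c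
  induction c with
  | zero =>
    intro t tc sp si ans st2 h hle
    rw [PySem.List.pyRange_one_eq_nil (by push_cast; omega)]
    simpa using h
  | succ c ih =>
    intro t tc sp si ans st2 h hle
    rw [PySem.List.pyRange_one_cons (by push_cast; omega)]
    simp only [List.foldl_cons]
    have hstep := step_inv prices t tc sp si ans st2 h (by omega)
    have hmain := ih (t + 1)
      (stepA prices (tc, sp, si) (t : Int)).1
      (stepA prices (tc, sp, si) (t : Int)).2.1
      (stepA prices (tc, sp, si) (t : Int)).2.2
      (stepB prices (ans, st2) ((t : Int), PySem.List.pyGetD prices (t : Int) 0)).1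
      (stepB prices (ans, st2) ((t : Int), PySem.List.pyGetD prices (t : Int) 0)).2
      hstep (by omega)
    have e1 : ((t : Int) + 1) = ((t + 1 : Nat) : Int) := by push_cast; ring
    have e2 : (t : Int) + ((c + 1 : Nat) : Int) = ((t + 1 : Nat) : Int) + (c : Int) := by
      push_cast; ring
    have e3 : t + (c + 1) = (t + 1) + c := by omega
    simp only [e1, e2, e3, Prod.mk.eta] at hmain ⊢
    exact hmain


theorem main_eq (prices : List Int) : solution prices = solution_alt prices := by
  rcases hn : prices.length with _ | m
  · have hnil : prices = [] := List.length_eq_zero_iff.mp hn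
    subst hnil; decide
  · -- n = m + 1
    have hmn : (prices.length : Int) - 1 = (m : Int) := by rw [hn]; push_cast; ring
    have h0 : StInv prices 0 (List.replicate prices.length 0) [] []
        (List.replicate prices.length 0) [] := by
      refine ⟨by simp, by simp, rfl, by simp, by simp, by simp, ?_⟩
      intro k hk
      simp
    have hmain := fold_inv prices m 0 (List.replicate prices.length 0) [] []
      (List.replicate prices.length 0) [] h0 (by omega)
    rw [show ((0 : Nat) : Int) = (0 : Int) by simp] at hmain
    rw [show (0 : Int) + (m : Int) = (m : Int) by ring] at hmain
    rw [show (0 + m) = m from Nat.zero_add m] at hmain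
    set FA := (PySem.List.pyRange 0 (m : Int) 1).foldl (stepA prices)
      (List.replicate prices.length 0, ([] : List Int), ([] : List Int)) with hFA
    set G := (PySem.List.pyRange 0 (m : Int) 1).foldl
      (fun st j => stepB prices st (j, PySem.List.pyGetD prices j 0))
      (List.replicate prices.length 0, ([] : List Int)) with hG
    obtain ⟨hlen_tc, hlen_ans, hst2, hsp, hnd, hbnd, hpt⟩ := hmain
    -- A's result is FA.1
    have hsolA : solution prices = FA.1 := by
      simp only [solution, PySem.List.len_eq, hmn, List.map_const']
      rw [show ((PySem.List.pyRange 0 (prices.length : Int) 1).length) = prices.length by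
        simp [PySem.List.length_pyRange_one]]
    -- B's main loop is one more step after G
    have hbnd' : ∀ i ∈ FA.2.2, 0 ≤ i ∧ i < ((G.1).length : Int) := by
      intro i hi; rcases hbnd i hi with ⟨a, b⟩
      exact ⟨a, by rw [hlen_ans, hn]; push_cast; omega⟩
    obtain ⟨p1, p2, p3, p4⟩ :=
      pop_ab prices (PySem.List.pyGetD prices (m : Int) 0) (m : Int) FA.2.2 G.1 hnd hbnd'
    set rB := popB (PySem.List.pyGetD prices (m : Int) 0) (m : Int) prices FA.2.2 G.1 with hrB
    have hBmain : (PySem.List.enumerate prices).foldl (stepB prices)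
        (List.replicate prices.length 0, ([] : List Int)) = (rB.2, (m : Int) :: rB.1) := by
      rw [PySem.List.enumerate_eq_map_pyRange (d := 0), List.foldl_map]
      rw [show (PySem.List.len prices) = ((m : Int) + 1) by
        simp [PySem.List.len_eq]; omega]
      rw [PySem.List.pyRange_one_succ_right (by positivity : (0 : Int) ≤ (m : Int)), List.foldl_append]
      simp only [List.foldl_cons, List.foldl_nil, ← hG]
      rw [show G = (G.1, G.2) from rfl, hst2]
      simp only [stepB, ← hrB]
    -- the leftover pass
    have hnotm : (m : Int) ∉ rB.1 := by
      intro hmem; rcases hbnd _ (p2.mem hmem) with ⟨_, hlt⟩; omega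
    obtain ⟨q1, q2⟩ := setAll_spec (fun i => PySem.List.len prices - 1 - i)
      ((m : Int) :: rB.1).reverse rB.2
      (by rw [List.nodup_reverse]; exact List.nodup_cons.mpr ⟨hnotm, p2.nodup hnd⟩)
      (by
        intro i hi
        rw [List.mem_reverse] at hi
        rcases List.mem_cons.mp hi with hc | hc
        · subst hc
          refine ⟨by positivity, ?_⟩
          rw [p3, hlen_ans, hn]; push_cast; omega
        · rcases hbnd _ (p2.mem hc) with ⟨a, b⟩
          refine ⟨a, ?_⟩
          rw [p3, hlen_ans, hn]; push_cast; omega)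
    have hsolB : solution_alt prices
        = ((m : Int) :: rB.1).reverse.foldl
            (fun a i => PySem.List.pySetD a i (PySem.List.len prices - 1 - i)) rB.2 := by
      simp only [solution_alt]
      rw [hBmain]
    rw [hsolA, hsolB]
    -- pointwise equality
    apply List.ext_getElem
    · rw [hlen_tc, q1, p3, hlen_ans]
    · intro k hk1 hk2
      rw [hlen_tc] at hk1
      rw [← List.getD_eq_getElem _ 0, ← List.getD_eq_getElem _ 0]
      rw [q2 k, p4 k]
      have hpt' := hpt k hk1
      have hv : PySem.List.len prices - 1 - (k : Int) = (m : Int) - (k : Int) := by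
        rw [PySem.List.len_eq, hmn]
      by_cases hkm : (k : Int) = (m : Int)
      · have hks : (k : Int) ∉ FA.2.2 := by
          intro hmem; rcases hbnd _ hmem with ⟨_, hlt⟩; omega
        rw [if_neg hks, if_neg (by omega)] at hpt'
        rw [if_pos (by simp [hkm]), hv, hpt'.1]
        omega
      · by_cases hks : (k : Int) ∈ FA.2.2
        · rw [if_pos hks] at hpt'
          by_cases hkr : (k : Int) ∈ rB.1
          · rw [if_pos (by simp [hkr]), hv, hpt'.1]
          · rw [if_neg (by
              rw [List.mem_reverse, List.mem_cons]
              rintro (hc | hc); exacts [hkm hc, hkr hc]),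
              if_pos ⟨hks, hkr⟩, hpt'.1]
        · have hkr : (k : Int) ∉ rB.1 := fun hm => hks (p2.mem hm)
          rw [if_neg (by
              rw [List.mem_reverse, List.mem_cons]
              rintro (hc | hc); exacts [hkm hc, hkr hc]),
            if_neg (by rintro ⟨hm, _⟩; exact hks hm)]
          rw [if_neg hks] at hpt'
          by_cases hklt : k < m
          · rw [if_pos hklt] at hpt'; exact hpt'
          · omega

-- ===== VERDICT (by name: the statement is the Claim_ definition above) =====
theorem solution_spec : Claim_equal_solution := by
  intro prices _
  exact main_eq prices
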